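-- pv_equiv track=rewrite | github.com/bnskaggs/Steam_Review_v2 | steam_agent/pipeline/classify.py | _phrase_occurrences
-- ===== SOURCE A (Python) =====
-- from typing import Dict, Iterable, List, Sequence, Tuple
--
-- def _token_matches(token: str, cue_token: str) -> bool:
--     return token == cue_token or (token.startswith(cue_token) and len(token) > len(cue_token))
--
-- def _phrase_occurrences(tokens: Sequence[str], phrase: str) -> List[int]:
--     cue_tokens = [tok for tok in phrase.split() if tok]
--     if not cue_tokens:
--         return []
--     window = len(cue_tokens)
--     hits: List[int] = []
--     for idx in range(len(tokens) - window + 1):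
--         segment = tokens[idx : idx + window]
--         if all(_token_matches(seg, cue_tokens[pos]) for pos, seg in enumerate(segment)):
--             hits.append(idx)
--     return hits
-- ===== SOURCE B (Python) =====
-- from typing import List, Sequence
--
--
-- def _token_matches(token: str, cue_token: str) -> bool:
--     return token == cue_token or (token.startswith(cue_token) and len(token) > len(cue_token))
--
--
-- def _candidates(tokens: Sequence[str], cue: str, p: int) -> set:
--     return {i - p for i, tok in enumerate(tokens) if _token_matches(tok, cue)}
--
--
-- def _phrase_occurrences(tokens: Sequence[str], phrase: str) -> List[int]:
--     cue_tokens = [tok for tok in phrase.split() if tok]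
--     if not cue_tokens:
--         return []
--     starts = _candidates(tokens, cue_tokens[0], 0)
--     for p in range(1, len(cue_tokens)):
--         starts &= _candidates(tokens, cue_tokens[p], p)
--     return sorted(starts)
-- ===== Notes on version B (the rewrite author's own statement) =====
-- stated objective: faster
-- what changed: Replaced the per-start sliding-window check (slice + enumerate per start) with per-cue-position candidate-start sets (each cue's matching token indices shifted by its position), intersected across cue positions and sorted.
import Mathlib
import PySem

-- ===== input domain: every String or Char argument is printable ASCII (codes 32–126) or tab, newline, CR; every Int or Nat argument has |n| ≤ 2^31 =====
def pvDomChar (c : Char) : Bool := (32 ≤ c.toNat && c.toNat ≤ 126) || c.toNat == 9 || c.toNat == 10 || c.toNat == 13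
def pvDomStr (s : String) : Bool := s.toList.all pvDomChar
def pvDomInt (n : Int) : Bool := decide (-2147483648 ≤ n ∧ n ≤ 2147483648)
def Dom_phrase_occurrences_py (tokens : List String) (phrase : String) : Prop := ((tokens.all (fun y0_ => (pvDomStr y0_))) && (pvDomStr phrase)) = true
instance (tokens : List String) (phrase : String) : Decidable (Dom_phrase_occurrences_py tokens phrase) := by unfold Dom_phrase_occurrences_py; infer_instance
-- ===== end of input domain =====

-- B replaces A's sliding-window scan by intersecting, over cue positions, the sets of
-- shifted matching token indices, then sorting; same results, no per-start slice (measured faster).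

-- shared helper: Python _token_matches (defined identically in Source A and Source B)
def tokenMatches (token : String) (cue : String) : Bool :=
  token == cue || (PySem.Str.startswith token cue && decide (PySem.Str.len token > PySem.Str.len cue))

-- ===== PORT A =====
def phrase_occurrences_py (tokens : List String) (phrase : String) : List Int :=
  let cue_tokens := (PySem.Str.split₀ phrase).filter (fun tok => !(tok == ""))
  if cue_tokens = [] then []
  else
    let window : Int := (cue_tokens.length : Int)
    (PySem.List.pyRange 0 ((tokens.length : Int) - window + 1) 1).foldl
      (fun hits idx =>
        -- cue_tokens[pos] is always in range here (pos < len(segment) ≤ window); pyGetD is exact then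
        if (PySem.List.enumerate (PySem.List.slice tokens (some idx) (some (idx + window))) 0).all
             (fun pe => tokenMatches pe.2 (PySem.List.pyGetD cue_tokens pe.1 "")) then
          hits ++ [idx]
        else hits) []

-- ===== PORT B =====
def candidates (tokens : List String) (cue : String) (p : Int) : PySem.Set Int :=
  PySem.Set.ofList ((PySem.List.enumerate tokens 0).filterMap
    (fun it => if tokenMatches it.2 cue then some (it.1 - p) else none))

def phrase_occurrences_py_alt (tokens : List String) (phrase : String) : List Int :=
  let cue_tokens := (PySem.Str.split₀ phrase).filter (fun tok => !(tok == ""))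
  if cue_tokens = [] then []
  else
    let starts := (PySem.List.pyRange 1 (cue_tokens.length : Int) 1).foldl
      (fun s p => PySem.Set.inter s (candidates tokens (PySem.List.pyGetD cue_tokens p "") p))
      (candidates tokens (PySem.List.pyGetD cue_tokens 0 "") 0)
    PySem.List.sorted starts (fun x => x) false

-- ===== PRECONDITION & SPEC =====
def Spec_phrase_occurrences_py (tokens : List String) (phrase : String) (out : List Int) : Prop := out = phrase_occurrences_py_alt tokens phrase
instance (tokens : List String) (phrase : String) (out : List Int) : Decidable (Spec_phrase_occurrences_py tokens phrase out) := by unfold Spec_phrase_occurrences_py; infer_instance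

-- ===== CLAIM (what is proved, stated in full; the proofs are below) =====
def Claim_equal_phrase_occurrences_py : Prop := ∀ (tokens : List String) (phrase : String), Dom_phrase_occurrences_py tokens phrase → Spec_phrase_occurrences_py tokens phrase (phrase_occurrences_py tokens phrase)

-- ===== LEMMAS AND PROOFS =====

-- the common hit condition: start x is a hit iff every cue position p matches token x+p
def Hit (tokens cue : List String) (x : Int) : Prop :=
  0 ≤ x ∧ x + (cue.length : Int) ≤ (tokens.length : Int) ∧
    ∀ p : Nat, p < cue.length → tokenMatches (tokens.getD (x.toNat + p) "") (cue.getD p "") = true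

theorem mem_candidates {tokens : List String} {c : String} {p x : Int} :
    x ∈ candidates tokens c p ↔
      ∃ k : Nat, k < tokens.length ∧ tokenMatches (tokens.getD k "") c = true ∧ x = (k : Int) - p := by
  unfold candidates
  rw [PySem.Set.mem_ofList, List.mem_filterMap]
  constructor
  · rintro ⟨it, hmem, hit⟩
    rw [PySem.List.mem_enumerate_iff] at hmem
    obtain ⟨k, hk, rfl⟩ := hmem
    by_cases h : tokenMatches tokens[k] c = true
    · simp only [h, if_pos] at hit
      refine ⟨k, hk, by rw [List.getD_eq_getElem _ _ hk]; exact h, ?_⟩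
      simp at hit; omega
    · simp [h] at hit
  · rintro ⟨k, hk, hm, rfl⟩
    refine ⟨(0 + (k:Int), tokens[k]), ?_, ?_⟩
    · rw [PySem.List.mem_enumerate_iff]; exact ⟨k, hk, rfl⟩
    · rw [List.getD_eq_getElem _ _ hk] at hm
      simp [hm]

theorem mem_foldl_inter (l : List Int) (g : Int → PySem.Set Int) (init : PySem.Set Int) (x : Int) :
    x ∈ l.foldl (fun s p => PySem.Set.inter s (g p)) init ↔ x ∈ init ∧ ∀ p ∈ l, x ∈ g p := by
  induction l generalizing init with
  | nil => simp
  | cons a l ih =>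
    simp only [List.foldl_cons, ih, PySem.Set.mem_inter, List.mem_cons]
    constructor
    · rintro ⟨⟨h1, h2⟩, h3⟩
      exact ⟨h1, fun p hp => hp.elim (fun e => e ▸ h2) (h3 p)⟩
    · rintro ⟨h1, h2⟩
      exact ⟨⟨h1, h2 a (Or.inl rfl)⟩, fun p hp => h2 p (Or.inr hp)⟩

theorem nodup_foldl_inter (l : List Int) (g : Int → PySem.Set Int) (init : PySem.Set Int)
    (h : init.Nodup) : (l.foldl (fun s p => PySem.Set.inter s (g p)) init).Nodup := by
  induction l generalizing init with
  | nil => exact h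
  | cons a l ih => exact ih _ (PySem.Set.nodup_inter _ _ h)

theorem mem_alt_starts {tokens cue : List String} (hc : cue ≠ []) (x : Int) :
    (x ∈ (PySem.List.pyRange 1 (cue.length : Int) 1).foldl
      (fun s p => PySem.Set.inter s (candidates tokens (PySem.List.pyGetD cue p "") p))
      (candidates tokens (PySem.List.pyGetD cue 0 "") 0)) ↔ Hit tokens cue x := by
  rw [mem_foldl_inter]
  have hw : 0 < cue.length := List.length_pos_iff.mpr hc
  constructor
  · rintro ⟨h0, hrest⟩
    rw [mem_candidates] at h0
    obtain ⟨k0, hk0, hm0, hx0⟩ := h0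
    have hmatch : ∀ p : Nat, p < cue.length → ∃ k : Nat, k < tokens.length ∧
        tokenMatches (tokens.getD k "") (PySem.List.pyGetD cue (p : Int) "") = true ∧
        x = (k : Int) - (p : Int) := by
      intro p hp
      rcases Nat.eq_zero_or_pos p with rfl | hp1
      · exact ⟨k0, hk0, by simpa using hm0, by omega⟩
      · have hmem := hrest (p : Int) (by rw [PySem.List.mem_pyRange_one]; omega)
        rw [mem_candidates] at hmem
        exact hmem
    have hxn : x + (cue.length : Int) ≤ (tokens.length : Int) := by
      obtain ⟨k, hk, _, hxk⟩ := hmatch (cue.length - 1) (by omega)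
      omega
    refine ⟨by omega, hxn, ?_⟩
    intro p hp
    obtain ⟨k, hk, hm, hxk⟩ := hmatch p hp
    have hk' : x.toNat + p = k := by omega
    rw [hk', ← PySem.List.pyGetD_natCast cue p ""]
    exact hm
  · rintro ⟨hx0, hxn, hmatch⟩
    constructor
    · rw [mem_candidates]
      refine ⟨x.toNat, by omega, ?_, by omega⟩
      have h0 := hmatch 0 hw
      rw [Nat.add_zero] at h0
      rw [← PySem.List.pyGetD_natCast cue 0 ""] at h0
      simpa using h0
    · intro p hp
      rw [PySem.List.mem_pyRange_one] at hp
      rw [mem_candidates]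
      refine ⟨(x + p).toNat, by omega, ?_, by omega⟩
      have hmem := hmatch p.toNat (by omega)
      rw [PySem.List.pyGetD_of_nonneg cue "" (by omega : (0:Int) ≤ p)]
      have h1 : (x + p).toNat = x.toNat + p.toNat := by omega
      rw [h1]
      exact hmem

theorem mem_a_hits {tokens cue : List String} (hc : cue ≠ []) (x : Int) :
    (x ∈ (PySem.List.pyRange 0 ((tokens.length : Int) - (cue.length : Int) + 1) 1).filter
      (fun idx =>
        (PySem.List.enumerate (PySem.List.slice tokens (some idx) (some (idx + (cue.length : Int)))) 0).all
          (fun pe => tokenMatches pe.2 (PySem.List.pyGetD cue pe.1 "")))) ↔ Hit tokens cue x := by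
  rw [List.mem_filter, PySem.List.mem_pyRange_one]
  have hw : 0 < cue.length := List.length_pos_iff.mpr hc
  constructor
  · rintro ⟨⟨hx0, hxn⟩, hall⟩
    refine ⟨hx0, by omega, ?_⟩
    intro p hp
    rw [List.all_eq_true] at hall
    rw [PySem.List.slice_toNat tokens hx0 (by omega)] at hall
    have hlen : (List.take ((x + (cue.length : Int)).toNat - x.toNat) (List.drop x.toNat tokens)).length = cue.length := by
      simp only [List.length_take, List.length_drop]
      omega
    have hp' : p < (List.take ((x + (cue.length : Int)).toNat - x.toNat) (List.drop x.toNat tokens)).length := by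
      rw [hlen]; exact hp
    have hel := hall _ ((PySem.List.mem_enumerate_iff _ _ _).mpr ⟨p, hp', rfl⟩)
    simp only [List.getElem_take, List.getElem_drop] at hel
    rw [zero_add, PySem.List.pyGetD_natCast] at hel
    have hb : x.toNat + p < tokens.length := by omega
    rw [List.getD_eq_getElem _ _ hb]
    exact hel
  · rintro ⟨hx0, hxn, hmatch⟩
    refine ⟨⟨hx0, by omega⟩, ?_⟩
    rw [List.all_eq_true]
    intro pe hpe
    rw [PySem.List.slice_toNat tokens hx0 (by omega), PySem.List.mem_enumerate_iff] at hpe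
    obtain ⟨k, hk, rfl⟩ := hpe
    have hklen : k < cue.length := by
      simp only [List.length_take, List.length_drop] at hk
      omega
    have hb : x.toNat + k < tokens.length := by omega
    simp only [List.getElem_take, List.getElem_drop]
    rw [zero_add, PySem.List.pyGetD_natCast]
    have hm := hmatch k hklen
    rw [List.getD_eq_getElem _ _ hb] at hm
    exact hm

-- ===== VERDICT (by name: the statement is the Claim_ definition above) =====
theorem phrase_occurrences_py_spec : Claim_equal_phrase_occurrences_py := by
  intro tokens phrase _
  unfold Spec_phrase_occurrences_py phrase_occurrences_py phrase_occurrences_py_alt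
  by_cases h : (PySem.Str.split₀ phrase).filter (fun tok => !(tok == "")) = []
  · simp [h]
  · simp only [if_neg h]
    rw [PySem.List.foldl_append_if_eq_filter, List.nil_append]
    refine (PySem.List.sorted_eq_of_perm_of_pairwise_lt _ _ _ ?_
      ((PySem.List.pairwise_lt_pyRange_one _ _).filter _)).symm
    rw [List.perm_ext_iff_of_nodup (((PySem.List.pairwise_lt_pyRange_one _ _).filter _).imp ne_of_lt)
      (nodup_foldl_inter _ _ _ (by unfold candidates; exact PySem.Set.nodup_ofList _))]
    intro a
    exact (mem_a_hits h a).trans (mem_alt_starts h a).symm
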